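-- pv_equiv track=rewrite | github.com/pypi-data/pypi-mirror-379 | packages/travelpy/travelpy-0.1.0.tar.gz/travelpy-0.1.0/src/travelpy/beamline/validation.py | extract_card_parameters
-- ===== SOURCE A (Python) =====
-- from typing import List, Tuple
--
-- def extract_card_parameters(line: str) -> List[str]:
--     """
--     Extract parameters from a TRAVEL card line.
--
--     Args:
--         line: TRAVEL card line
--
--     Returns:
--         List of parameter strings (including card number as first parameter)
--     """
--     stripped = line.strip()
--
--     # Find the first semicolon that's not inside quotes - this marks the end of parameters
--     semicolon_pos = None
--     in_quotes = False
--     for i, char in enumerate(stripped):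
--         if char == '"':
--             in_quotes = not in_quotes
--         elif char == ";" and not in_quotes:
--             semicolon_pos = i
--             break
--
--     # Extract only the part before the semicolon
--     if semicolon_pos is not None:
--         stripped = stripped[:semicolon_pos]
--
--     # Split on whitespace, but preserve quoted strings
--     parts = []
--     current_part = ""
--     in_quotes = False
--
--     for char in stripped:
--         if char == '"':
--             in_quotes = not in_quotes
--             current_part += char
--         elif char.isspace() and not in_quotes:
--             if current_part:
--                 parts.append(current_part)
--                 current_part = ""
--         else:
--             current_part += char
--
--     if current_part:
--         parts.append(current_part)
--
--     return parts
-- ===== SOURCE B (Python) =====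
-- def extract_card_parameters(line):
--     """Single-pass parser: one scan tracks quotes, splits on whitespace and
--     stops at the first unquoted semicolon."""
--     parts = []
--     current_part = ""
--     in_quotes = False
--     for char in line.strip():
--         if char == '"':
--             in_quotes = not in_quotes
--             current_part += char
--         elif char == ";" and not in_quotes:
--             break
--         elif char.isspace() and not in_quotes:
--             if current_part:
--                 parts.append(current_part)
--                 current_part = ""
--         else:
--             current_part += char
--     if current_part:
--         parts.append(current_part)
--     return parts
-- ===== Notes on version B (the rewrite author's own statement) =====
-- stated objective: simpler
-- what changed: Replaces A's two scans (first find the unquoted semicolon and slice, then tokenize the slice) by a single pass that tokenizes and breaks at the first unquoted semicolon.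
import Mathlib
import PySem

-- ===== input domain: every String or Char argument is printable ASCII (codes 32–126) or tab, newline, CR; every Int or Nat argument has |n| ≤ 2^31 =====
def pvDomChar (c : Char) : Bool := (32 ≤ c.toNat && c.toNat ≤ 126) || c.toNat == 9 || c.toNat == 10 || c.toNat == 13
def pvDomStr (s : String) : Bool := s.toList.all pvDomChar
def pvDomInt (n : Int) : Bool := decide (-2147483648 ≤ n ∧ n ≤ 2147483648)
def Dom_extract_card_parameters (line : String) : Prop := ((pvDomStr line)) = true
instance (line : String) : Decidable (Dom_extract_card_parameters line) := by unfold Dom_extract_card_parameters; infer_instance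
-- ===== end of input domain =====

-- B merges A's two scans (find unquoted semicolon + tokenize) into one pass: simpler.

-- ===== PORT A =====
-- first loop of A: index of the first semicolon outside quotes (enumerate with running index i)
def pvFindSemi (s : List Char) (in_quotes : Bool) (i : Nat) : Option Nat :=
  match s with
  | [] => none
  | c :: rest =>
    if c = '"' then pvFindSemi rest (!in_quotes) (i + 1)
    else if c = ';' ∧ in_quotes = false then some i
    else pvFindSemi rest in_quotes (i + 1)

-- second loop of A: whitespace-split preserving quoted strings; current_part kept as List Char
def pvTokLoop (s : List Char) (parts : List String) (cur : List Char) (in_quotes : Bool) : List String :=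
  match s with
  | [] => if cur = [] then parts else parts ++ [String.ofList cur]
  | c :: rest =>
    if c = '"' then pvTokLoop rest parts (cur ++ [c]) (!in_quotes)
    else if PySem.Chars.isspace c ∧ in_quotes = false then
      (if cur = [] then pvTokLoop rest parts [] in_quotes
       else pvTokLoop rest (parts ++ [String.ofList cur]) [] in_quotes)
    else pvTokLoop rest parts (cur ++ [c]) in_quotes

def extract_card_parameters (line : String) : List String :=
  let stripped := (PySem.Str.strip line).toList
  let stripped2 :=
    match pvFindSemi stripped false 0 with
    | none => stripped
    | some p => stripped.take p
  pvTokLoop stripped2 [] [] false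

-- ===== PORT B =====
-- single pass: tokenize, flushing on whitespace, stopping at an unquoted ';'
def pvScan (s : List Char) (parts : List String) (cur : List Char) (in_quotes : Bool) : List String :=
  match s with
  | [] => if cur = [] then parts else parts ++ [String.ofList cur]
  | c :: rest =>
    if c = '"' then pvScan rest parts (cur ++ [c]) (!in_quotes)
    else if c = ';' ∧ in_quotes = false then
      (if cur = [] then parts else parts ++ [String.ofList cur])
    else if PySem.Chars.isspace c ∧ in_quotes = false then
      (if cur = [] then pvScan rest parts [] in_quotes
       else pvScan rest (parts ++ [String.ofList cur]) [] in_quotes)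
    else pvScan rest parts (cur ++ [c]) in_quotes

def extract_card_parameters_alt (line : String) : List String :=
  pvScan (PySem.Str.strip line).toList [] [] false

-- ===== PRECONDITION & SPEC =====
def Spec_extract_card_parameters (line : String) (out : List String) : Prop := out = extract_card_parameters_alt line
instance (line : String) (out : List String) : Decidable (Spec_extract_card_parameters line out) := by unfold Spec_extract_card_parameters; infer_instance

-- ===== CLAIM (what is proved, stated in full; the proofs are below) =====
def Claim_equal_extract_card_parameters : Prop := ∀ (line : String), Dom_extract_card_parameters line → Spec_extract_card_parameters line (extract_card_parameters line)

-- ===== LEMMAS AND PROOFS =====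

-- the prefix of s up to (excluding) the first unquoted ';'
def pvCut (s : List Char) (in_quotes : Bool) : List Char :=
  match s with
  | [] => []
  | c :: rest =>
    if c = '"' then c :: pvCut rest (!in_quotes)
    else if c = ';' ∧ in_quotes = false then []
    else c :: pvCut rest in_quotes

theorem pvFindSemi_shift (s : List Char) : ∀ (q : Bool) (i : Nat),
    pvFindSemi s q i = (pvFindSemi s q 0).map (i + ·) := by
  induction s with
  | nil => intro q i; simp [pvFindSemi]
  | cons c rest ih =>
    intro q i
    simp only [pvFindSemi]
    split_ifs with h1 h2
    · rw [ih (!q) (i + 1), ih (!q) 1]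
      simp [Option.map_map]
    · simp
    · rw [ih q (i + 1), ih q 1]
      simp [Option.map_map]

theorem pvTake_findSemi (s : List Char) : ∀ (q : Bool),
    (match pvFindSemi s q 0 with
     | none => s
     | some p => s.take p) = pvCut s q := by
  induction s with
  | nil => intro q; simp [pvFindSemi, pvCut]
  | cons c rest ih =>
    intro q
    by_cases h1 : c = '"'
    · simp only [pvFindSemi, if_pos h1, pvCut]
      rw [pvFindSemi_shift rest (!q) 1]
      have hih := ih (!q)
      cases hf : pvFindSemi rest (!q) 0 with
      | none => rw [hf] at hih; simpa using hih
      | some p =>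
        rw [hf] at hih
        simp only [Option.map_some]
        show List.take (1 + p) (c :: rest) = c :: pvCut rest (!q)
        rw [Nat.add_comm, List.take_succ_cons]
        simpa using hih
    · by_cases h2 : c = ';' ∧ q = false
      · simp [pvFindSemi, if_neg h1, if_pos h2, pvCut]
      · simp only [pvFindSemi, if_neg h1, if_neg h2, pvCut]
        rw [pvFindSemi_shift rest q 1]
        have hih := ih q
        cases hf : pvFindSemi rest q 0 with
        | none => rw [hf] at hih; simpa using hih
        | some p =>
          rw [hf] at hih
          simp only [Option.map_some]
          show List.take (1 + p) (c :: rest) = c :: pvCut rest q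
          rw [Nat.add_comm, List.take_succ_cons]
          simpa using hih

theorem pvScan_eq_tokLoop_cut (s : List Char) : ∀ parts cur q,
    pvScan s parts cur q = pvTokLoop (pvCut s q) parts cur q := by
  induction s with
  | nil => intro parts cur q; simp [pvScan, pvCut, pvTokLoop]
  | cons c rest ih =>
    intro parts cur q
    by_cases h1 : c = '"'
    · simp only [pvScan, pvCut, if_pos h1, pvTokLoop]
      exact ih _ _ _
    · by_cases h2 : c = ';' ∧ q = false
      · simp only [pvScan, pvCut, if_neg h1, if_pos h2, pvTokLoop]
      · by_cases h3 : PySem.Chars.isspace c = true ∧ q = false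
        · simp only [pvScan, pvCut, if_neg h1, if_neg h2, if_pos h3, pvTokLoop]
          by_cases hc : cur = []
          · simp only [if_pos hc]; exact ih _ _ _
          · simp only [if_neg hc]; exact ih _ _ _
        · simp only [pvScan, pvCut, if_neg h1, if_neg h2, if_neg h3, pvTokLoop]
          exact ih _ _ _

-- ===== VERDICT (by name: the statement is the Claim_ definition above) =====
theorem extract_card_parameters_spec : Claim_equal_extract_card_parameters := by
  intro line _
  unfold Spec_extract_card_parameters extract_card_parameters extract_card_parameters_alt
  rw [pvScan_eq_tokLoop_cut, ← pvTake_findSemi]
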